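-- pv_equiv track=rewrite | github.com/abhijeetbodas2001/dsa | leetcode/solutions/spiral-matrix/sol.py | _get_shell
-- ===== SOURCE A (Python) =====
-- from typing import List
--
-- def _get_shell(
--     matrix, up: int, down: int, left: int, right: int
-- ) -> List[int]:
--     """
--     Can this be changed to return an iterable?
--     """
--     if up > down or left > right:
--         return []
--
--     if up == down and left == right:
--         return [matrix[up][left]]
--
--     if up == down:
--         return matrix[up][left : right + 1]
--
--     if left == right:
--         return [matrix[row][left] for row in range(up, down + 1)]
--
--     shell = []
--     shell.extend(matrix[up][col] for col in range(left, right + 1))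
--     shell.extend(matrix[row][right] for row in range(up + 1, down + 1))
--     shell.extend(matrix[down][col] for col in range(right - 1, left - 1, -1))
--     shell.extend(matrix[row][left] for row in range(down - 1, up, -1))
--
--     return shell
-- ===== SOURCE B (Python) =====
-- def _get_shell(matrix, up: int, down: int, left: int, right: int):
--     if up > down or left > right:
--         return []
--     h, w = down - up + 1, right - left + 1
--     n = h * w - max(h - 2, 0) * max(w - 2, 0)  # number of perimeter cells
--     dirs = [(0, 1), (1, 0), (0, -1), (-1, 0)]  # right, down, left, up
--     r, c, d = up, left, 0
--     out = []
--     for _ in range(n):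
--         out.append(matrix[r][c])
--         nr, nc = r + dirs[d][0], c + dirs[d][1]
--         if not (up <= nr <= down and left <= nc <= right):
--             d = (d + 1) % 4
--             nr, nc = r + dirs[d][0], c + dirs[d][1]
--         r, c = nr, nc
--     return out
-- ===== Notes on version B (the rewrite author's own statement) =====
-- stated objective: alternative
-- what changed: A builds the shell from three special-case branches plus four staged edge extensions; B instead simulates a single boundary walk: one loop over a closed-form perimeter-cell count, maintaining a position and a direction that rotates clockwise whenever the next cell would leave the rectangle, which handles single-cell/row/column shapes uniformly with no special cases.
-- outside the precondition, e.g. on _get_shell([[1, 2, 3]], 0, 0, -2, 1): A returns [2], B returns [2, 3, 1, 2]; on _get_shell([[1, 2]], 0, 0, 0, 5): A returns [1, 2], B raises IndexError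
import Mathlib
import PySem

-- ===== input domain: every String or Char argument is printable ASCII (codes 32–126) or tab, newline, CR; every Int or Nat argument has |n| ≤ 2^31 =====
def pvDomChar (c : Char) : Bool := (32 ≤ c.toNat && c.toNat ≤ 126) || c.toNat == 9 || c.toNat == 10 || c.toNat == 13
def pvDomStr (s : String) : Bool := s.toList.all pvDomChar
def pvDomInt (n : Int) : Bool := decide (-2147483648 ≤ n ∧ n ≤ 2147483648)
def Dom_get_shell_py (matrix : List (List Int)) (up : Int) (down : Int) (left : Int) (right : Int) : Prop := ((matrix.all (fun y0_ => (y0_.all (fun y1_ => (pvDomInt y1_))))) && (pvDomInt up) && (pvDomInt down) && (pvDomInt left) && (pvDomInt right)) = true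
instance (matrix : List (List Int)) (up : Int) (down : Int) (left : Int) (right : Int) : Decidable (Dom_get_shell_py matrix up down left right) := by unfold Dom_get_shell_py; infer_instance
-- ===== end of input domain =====

-- B replaces A's special-case branches and four staged edge extensions by one boundary-walk
-- simulation (position + clockwise-turning direction, closed-form step count) (objective: alternative).

-- ===== PORT A =====
-- A's matrix[r][c] is ported as pyGetD (defaults [] / 0); exact under Pre_, which keeps every accessed index nonnegative and in range.
def get_shell_py (matrix : List (List Int)) (up : Int) (down : Int) (left : Int) (right : Int) : List Int :=
  if up > down ∨ left > right then []
  else if up = down ∧ left = right then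
    [PySem.List.pyGetD (PySem.List.pyGetD matrix up []) left 0]
  else if up = down then
    PySem.List.slice (PySem.List.pyGetD matrix up []) (some left) (some (right + 1))
  else if left = right then
    (PySem.List.pyRange up (down + 1) 1).map (fun row => PySem.List.pyGetD (PySem.List.pyGetD matrix row []) left 0)
  else
    ((PySem.List.pyRange left (right + 1) 1).map (fun col => PySem.List.pyGetD (PySem.List.pyGetD matrix up []) col 0))
    ++ ((PySem.List.pyRange (up + 1) (down + 1) 1).map (fun row => PySem.List.pyGetD (PySem.List.pyGetD matrix row []) right 0))
    ++ ((PySem.List.pyRange (right - 1) (left - 1) (-1)).map (fun col => PySem.List.pyGetD (PySem.List.pyGetD matrix down []) col 0))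
    ++ ((PySem.List.pyRange (down - 1) up (-1)).map (fun row => PySem.List.pyGetD (PySem.List.pyGetD matrix row []) left 0))

-- ===== PORT B =====
-- B's dirs table: 0 = right, 1 = down, 2 = left, 3 = up
def pvDirs : Nat → Int × Int
  | 0 => (0, 1)
  | 1 => (1, 0)
  | 2 => (0, -1)
  | _ => (-1, 0)

-- one iteration's position/direction update (B's loop body after the append)
def pvStep (up down left right r c : Int) (d : Nat) : Int × Int × Nat :=
  let nr := r + (pvDirs d).1
  let nc := c + (pvDirs d).2
  if up ≤ nr ∧ nr ≤ down ∧ left ≤ nc ∧ nc ≤ right then (nr, nc, d)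
  else
    let d' := (d + 1) % 4
    (r + (pvDirs d').1, c + (pvDirs d').2, d')

-- B's for-loop over range(n): append matrix[r][c] (as pyGetD, exact under Pre_), then step
def pvWalk (matrix : List (List Int)) (up down left right : Int) : Nat → Int → Int → Nat → List Int
  | 0, _, _, _ => []
  | k + 1, r, c, d =>
    PySem.List.pyGetD (PySem.List.pyGetD matrix r []) c 0 ::
      (let s := pvStep up down left right r c d
       pvWalk matrix up down left right k s.1 s.2.1 s.2.2)

def get_shell_py_alt (matrix : List (List Int)) (up : Int) (down : Int) (left : Int) (right : Int) : List Int :=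
  if up > down ∨ left > right then []
  else
    pvWalk matrix up down left right
      ((down - up + 1) * (right - left + 1) - max (down - up - 1) 0 * max (right - left - 1) 0).toNat
      up left 0

-- ===== PRECONDITION & SPEC =====
-- Pre_ excludes non-empty rectangles with a negative or out-of-range bound (it also asks every row, not only
-- rows up..down, to reach past `right` — a mild uniform narrowing): on such bounds A usually raises IndexError,
-- and in the remaining corners (negative wraparound; the single-row case, where A's slice silently clamps while
-- per-element indexing raises or wraps) A's value is an accident of slice/negative-index semantics.
def Pre_get_shell_py (matrix : List (List Int)) (up : Int) (down : Int) (left : Int) (right : Int) : Prop :=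
  (up > down ∨ left > right) ∨
  (0 ≤ up ∧ down < (matrix.length : Int) ∧ 0 ≤ left ∧ ∀ row ∈ matrix, right < (row.length : Int))
instance (matrix : List (List Int)) (up : Int) (down : Int) (left : Int) (right : Int) : Decidable (Pre_get_shell_py matrix up down left right) := by unfold Pre_get_shell_py; infer_instance

def pvWitness_get_shell_py : List (List Int) × Int × Int × Int × Int :=
  ([[1, 2, 3], [4, 5, 6], [7, 8, 9]], 0, 2, 0, 2)

def Spec_get_shell_py (matrix : List (List Int)) (up : Int) (down : Int) (left : Int) (right : Int) (out : List Int) : Prop := out = get_shell_py_alt matrix up down left right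
instance (matrix : List (List Int)) (up : Int) (down : Int) (left : Int) (right : Int) (out : List Int) : Decidable (Spec_get_shell_py matrix up down left right out) := by unfold Spec_get_shell_py; infer_instance

-- ===== CLAIM (what is proved, stated in full; the proofs are below) =====
def Claim_equal_get_shell_py : Prop := ∀ (matrix : List (List Int)) (up : Int) (down : Int) (left : Int) (right : Int), Dom_get_shell_py matrix up down left right → Pre_get_shell_py matrix up down left right → Spec_get_shell_py matrix up down left right (get_shell_py matrix up down left right)

-- ===== LEMMAS AND PROOFS =====

-- unfold one walk iteration, with the step result given as an equation
theorem pvWalk_succ (matrix : List (List Int)) (up down left right : Int) (k : Nat) (r c : Int) (d : Nat) :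
    pvWalk matrix up down left right (k + 1) r c d =
      PySem.List.pyGetD (PySem.List.pyGetD matrix r []) c 0 ::
        pvWalk matrix up down left right k
          (pvStep up down left right r c d).1
          (pvStep up down left right r c d).2.1
          (pvStep up down left right r c d).2.2 := rfl

theorem pvWalk_step {matrix : List (List Int)} {up down left right : Int} {k : Nat} {r c : Int} {d : Nat}
    {r' c' : Int} {d' : Nat} (hstep : pvStep up down left right r c d = (r', c', d')) :
    pvWalk matrix up down left right (k + 1) r c d =
      PySem.List.pyGetD (PySem.List.pyGetD matrix r []) c 0 ::
        pvWalk matrix up down left right k r' c' d' := by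
  rw [pvWalk_succ, hstep]

-- phase 1: moving right along row `up`, from column c to `right`, then turn to direction 1 at (up+1, right)
theorem pvPhaseR (matrix : List (List Int)) (up down left right : Int)
    (k : Nat) (c : Int) (hc : left ≤ c) (hk : c + (k : Int) = right) (hud : up ≤ down) (rest : Nat) :
    pvWalk matrix up down left right (k + 1 + rest) up c 0 =
      ((PySem.List.pyRange c (right + 1) 1).map
        (fun j => PySem.List.pyGetD (PySem.List.pyGetD matrix up []) j 0))
      ++ pvWalk matrix up down left right rest (up + 1) right 1 := by
  induction k generalizing c with
  | zero =>
    have hcr : c = right := by omega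
    subst hcr
    have hf : 0 + 1 + rest = rest + 1 := by omega
    have hstep : pvStep up down left c up c 0 = (up + 1, c, 1) := by
      simp only [pvStep, pvDirs]
      rw [if_neg (by omega)]
      norm_num
      all_goals omega
    rw [hf, pvWalk_step hstep, PySem.List.pyRange_one_singleton]
    rfl
  | succ n ih =>
    have h1 : n + 1 + 1 + rest = (n + 1 + rest) + 1 := by omega
    have hstep : pvStep up down left right up c 0 = (up, c + 1, 0) := by
      simp only [pvStep, pvDirs]
      rw [if_pos (by refine ⟨by omega, by omega, by omega, by omega⟩)]
      norm_num
      all_goals omega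
    rw [h1, pvWalk_step hstep, ih (c + 1) (by omega) (by omega)]
    rw [PySem.List.pyRange_one_cons (by omega : c < right + 1)]
    simp

-- phase 2: moving down along column `right`, from row r to `down`, then turn to direction 2 at (down, right-1)
theorem pvPhaseD (matrix : List (List Int)) (up down left right : Int)
    (k : Nat) (r : Int) (hr : up ≤ r) (hk : r + (k : Int) = down) (hlr : left ≤ right) (rest : Nat) :
    pvWalk matrix up down left right (k + 1 + rest) r right 1 =
      ((PySem.List.pyRange r (down + 1) 1).map
        (fun i => PySem.List.pyGetD (PySem.List.pyGetD matrix i []) right 0))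
      ++ pvWalk matrix up down left right rest down (right - 1) 2 := by
  induction k generalizing r with
  | zero =>
    have hrd : r = down := by omega
    subst hrd
    have hf : 0 + 1 + rest = rest + 1 := by omega
    have hstep : pvStep up r left right r right 1 = (r, right - 1, 2) := by
      simp only [pvStep, pvDirs]
      rw [if_neg (by omega)]
      norm_num
      all_goals omega
    rw [hf, pvWalk_step hstep, PySem.List.pyRange_one_singleton]
    rfl
  | succ n ih =>
    have h1 : n + 1 + 1 + rest = (n + 1 + rest) + 1 := by omega
    have hstep : pvStep up down left right r right 1 = (r + 1, right, 1) := by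
      simp only [pvStep, pvDirs]
      rw [if_pos (by refine ⟨by omega, by omega, by omega, by omega⟩)]
      norm_num
      all_goals omega
    rw [h1, pvWalk_step hstep, ih (r + 1) (by omega) (by omega)]
    rw [PySem.List.pyRange_one_cons (by omega : r < down + 1)]
    simp

-- phase 3: moving left along row `down`, from column c to `left`, then turn to direction 3 at (down-1, left)
theorem pvPhaseL (matrix : List (List Int)) (up down left right : Int)
    (k : Nat) (c : Int) (hc : c ≤ right) (hk : left + (k : Int) = c) (hud : up ≤ down) (rest : Nat) :
    pvWalk matrix up down left right (k + 1 + rest) down c 2 =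
      ((PySem.List.pyRange c (left - 1) (-1)).map
        (fun j => PySem.List.pyGetD (PySem.List.pyGetD matrix down []) j 0))
      ++ pvWalk matrix up down left right rest (down - 1) left 3 := by
  induction k generalizing c with
  | zero =>
    have hcl : c = left := by omega
    subst hcl
    have hf : 0 + 1 + rest = rest + 1 := by omega
    have hstep : pvStep up down c right down c 2 = (down - 1, c, 3) := by
      simp only [pvStep, pvDirs]
      rw [if_neg (by omega)]
      norm_num
      all_goals omega
    rw [hf, pvWalk_step hstep,
        PySem.List.pyRange_neg_one_cons (by omega : c - 1 < c),
        PySem.List.pyRange_neg_one_eq_nil (by omega : c - 1 ≤ c - 1)]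
    rfl
  | succ n ih =>
    have h1 : n + 1 + 1 + rest = (n + 1 + rest) + 1 := by omega
    have hstep : pvStep up down left right down c 2 = (down, c - 1, 2) := by
      simp only [pvStep, pvDirs]
      rw [if_pos (by refine ⟨by omega, by omega, by omega, by omega⟩)]
      norm_num
      all_goals omega
    rw [h1, pvWalk_step hstep, ih (c - 1) (by omega) (by omega)]
    rw [PySem.List.pyRange_neg_one_cons (by omega : left - 1 < c)]
    simp

-- phase 4: moving up along column `left`, from row r down to `up+1`; fuel runs out exactly there
theorem pvPhaseU (matrix : List (List Int)) (up down left right : Int)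
    (k : Nat) (r : Int) (hk : up + (k : Int) = r) (hr : r ≤ down) (hlr : left ≤ right) :
    pvWalk matrix up down left right k r left 3 =
      ((PySem.List.pyRange r up (-1)).map
        (fun i => PySem.List.pyGetD (PySem.List.pyGetD matrix i []) left 0)) := by
  induction k generalizing r with
  | zero =>
    have : r = up := by omega
    subst this
    rw [PySem.List.pyRange_neg_one_eq_nil (by omega : r ≤ r)]
    rfl
  | succ n ih =>
    have hstep : pvStep up down left right r left 3 = (r - 1, left, 3) := by
      simp only [pvStep, pvDirs]
      rw [if_pos (by refine ⟨by omega, by omega, by omega, by omega⟩)]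
      norm_num
      all_goals omega
    rw [pvWalk_step hstep, ih (r - 1) (by omega) (by omega)]
    rw [PySem.List.pyRange_neg_one_cons (by omega : up < r)]
    simp

-- A's single-row slice equals the per-column map (needs in-range bounds from Pre_)
theorem pv_map_get_eq_slice (row : List Int) (a b : Int) (h0 : 0 ≤ a) (hb : b ≤ (row.length : Int)) (hab : a ≤ b) :
    (PySem.List.pyRange a b 1).map (fun c => PySem.List.pyGetD row c 0)
      = PySem.List.slice row (some a) (some b) := by
  have hdrop := PySem.List.map_pyGetD_pyRange' row 0 h0
  rw [PySem.List.pyRange_one_append a b (row.length : Int) hab hb, List.map_append] at hdrop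
  have hlen : ((PySem.List.pyRange a b 1).map (fun c => PySem.List.pyGetD row c 0)).length = (b - a).toNat := by
    simp [PySem.List.length_pyRange_one]
  rw [PySem.List.slice_toNat row h0 (by omega)]
  have h2 : (b).toNat - (a).toNat = (b - a).toNat := by omega
  rw [h2, ← hdrop, ← hlen, List.take_left]

theorem pv_main (matrix : List (List Int)) (up down left right : Int)
    (hpre : Pre_get_shell_py matrix up down left right) :
    get_shell_py matrix up down left right = get_shell_py_alt matrix up down left right := by
  unfold Pre_get_shell_py at hpre
  unfold get_shell_py get_shell_py_alt
  by_cases he : up > down ∨ left > right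
  · simp [he]
  · rw [if_neg he, if_neg he]
    rw [not_or] at he
    have hud : up ≤ down := by omega
    have hlr : left ≤ right := by omega
    clear he
    obtain ⟨hup0, hdlen, hleft0, hrow⟩ :
        0 ≤ up ∧ down < (matrix.length : Int) ∧ 0 ≤ left ∧ ∀ row ∈ matrix, right < (row.length : Int) := by
      rcases hpre with h | h
      · omega
      · exact h
    by_cases h1 : up = down
    · subst h1
      by_cases h2 : left = right
      · subst h2
        rw [if_pos ⟨rfl, rfl⟩]
        have hn : ((up - up + 1) * (left - left + 1) - max (up - up - 1) 0 * max (left - left - 1) 0).toNat = 1 := by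
          have e2 : max (up - up - 1) 0 = 0 := by omega
          have e3 : max (left - left - 1) 0 = 0 := by omega
          rw [e2, e3, zero_mul]
          norm_num
        rw [hn]
        rfl
      · -- single row: walk = one rightward phase; A's slice = the same map
        rw [if_neg (by simp [h2]), if_pos rfl]
        have hn : ((up - up + 1) * (right - left + 1) - max (up - up - 1) 0 * max (right - left - 1) 0).toNat
            = (right - left).toNat + 1 + 0 := by
          have e1 : (up - up + 1) * (right - left + 1) = right - left + 1 := by ring
          have e2 : max (up - up - 1) 0 = 0 := by omega
          rw [e1, e2, zero_mul]
          omega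
        rw [hn,
          pvPhaseR matrix up up left right (right - left).toNat left le_rfl (by omega) le_rfl 0]
        have hmem : PySem.List.pyGetD matrix up [] ∈ matrix :=
          PySem.List.pyGetD_mem matrix [] (by unfold PySem.Raise.InRange; omega)
        rw [← pv_map_get_eq_slice _ left (right + 1) hleft0 (by have := hrow _ hmem; omega) (by omega)]
        simp [pvWalk]
    · have hud' : up < down := by omega
      by_cases h2 : left = right
      · subst h2
        -- single column: first step turns from direction 0 to 1, then one downward phase
        rw [if_neg (by simp [h1]), if_neg h1, if_pos rfl]
        have hn : ((down - up + 1) * (left - left + 1) - max (down - up - 1) 0 * max (left - left - 1) 0).toNat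
            = ((down - (up + 1)).toNat + 1 + 0) + 1 := by
          have e1 : (down - up + 1) * (left - left + 1) = down - up + 1 := by ring
          have e2 : max (left - left - 1) 0 = 0 := by omega
          rw [e1, e2, mul_zero]
          omega
        have hstep : pvStep up down left left up left 0 = (up + 1, left, 1) := by
          simp only [pvStep, pvDirs]
          rw [if_neg (by omega)]
          norm_num
        rw [hn, pvWalk_step hstep]
        rw [pvPhaseD matrix up down left left (down - (up + 1)).toNat (up + 1) (by omega) (by omega) le_rfl 0]
        rw [PySem.List.pyRange_one_cons (by omega : up < down + 1)]
        simp [pvWalk]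
      · -- proper ring: four phases
        rw [if_neg (by simp [h2]), if_neg h1, if_neg h2]
        have hlr' : left < right := by omega
        have hn : ((down - up + 1) * (right - left + 1) - max (down - up - 1) 0 * max (right - left - 1) 0).toNat
            = (right - left).toNat + 1 +
              ((down - (up + 1)).toNat + 1 +
                ((right - 1 - left).toNat + 1 + (down - 1 - up).toNat)) := by
          have hmax1 : max (down - up - 1) 0 = down - up - 1 := by omega
          have hmax2 : max (right - left - 1) 0 = right - left - 1 := by omega
          rw [hmax1, hmax2]
          have e : (down - up + 1) * (right - left + 1) - (down - up - 1) * (right - left - 1)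
              = 2 * (down - up) + 2 * (right - left) := by ring
          rw [e]; omega
        rw [hn,
          pvPhaseR matrix up down left right (right - left).toNat left le_rfl (by omega) hud,
          pvPhaseD matrix up down left right (down - (up + 1)).toNat (up + 1) (by omega) (by omega) hlr,
          pvPhaseL matrix up down left right (right - 1 - left).toNat (right - 1) (by omega) (by omega) hud,
          pvPhaseU matrix up down left right (down - 1 - up).toNat (down - 1) (by omega) (by omega) hlr]
        simp [List.append_assoc]

-- ===== VERDICT (by name: the statement is the Claim_ definition above) =====
theorem get_shell_py_spec : Claim_equal_get_shell_py := by
  intro matrix up down left right _ hpre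
  unfold Spec_get_shell_py
  exact pv_main matrix up down left right hpre
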